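-- pv_equiv track=rewrite | github.com/nikolay-e/treemapper | tests/framework/runner.py | _extract_content_by_file
-- ===== SOURCE A (Python) =====
-- def _extract_content_by_file(context: dict) -> dict[str, str]:
--     by_file: dict[str, list[str]] = {}
--     for frag in context.get("fragments", []):
--         path = frag.get("path", "")
--         if path not in by_file:
--             by_file[path] = []
--         if "content" in frag:
--             by_file[path].append(frag["content"])
--     return {path: "\n".join(parts) for path, parts in by_file.items()}
-- ===== SOURCE B (Python) =====
-- def _extract_content_by_file(context: dict) -> dict[str, str]:
--     frags = context.get("fragments", [])
--     paths = list(dict.fromkeys(f.get("path", "") for f in frags))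
--     return {
--         p: "\n".join(f["content"] for f in frags
--                      if f.get("path", "") == p and "content" in f)
--         for p in paths
--     }
-- ===== Notes on version B (the rewrite author's own statement) =====
-- stated objective: idiomatic
-- what changed: Replaces the single-pass dict-of-lists grouping with a dict.fromkeys ordered-dedup of paths followed by a per-path comprehension that rescans the fragments and joins the matching contents directly.
import Mathlib
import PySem

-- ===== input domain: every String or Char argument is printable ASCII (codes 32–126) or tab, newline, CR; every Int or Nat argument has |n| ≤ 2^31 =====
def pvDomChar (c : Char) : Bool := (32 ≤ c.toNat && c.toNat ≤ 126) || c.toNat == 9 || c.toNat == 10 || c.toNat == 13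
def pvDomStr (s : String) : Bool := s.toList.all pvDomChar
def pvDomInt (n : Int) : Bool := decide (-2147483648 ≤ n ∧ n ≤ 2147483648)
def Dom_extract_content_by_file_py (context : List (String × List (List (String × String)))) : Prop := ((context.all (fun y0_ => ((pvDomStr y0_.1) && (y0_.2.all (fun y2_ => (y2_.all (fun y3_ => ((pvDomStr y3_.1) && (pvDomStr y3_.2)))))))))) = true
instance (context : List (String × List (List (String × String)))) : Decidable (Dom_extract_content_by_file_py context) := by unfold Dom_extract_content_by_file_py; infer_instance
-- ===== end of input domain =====

-- B groups by an ordered dedup of the paths and a per-path rescan of the fragments,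
-- instead of A's incremental dict-of-lists; objective: more idiomatic grouping comprehension.

-- ===== PORT A =====
-- loop body of A's 'for frag in …' loop; 'frag["content"]' is read under the
-- 'if "content" in frag' guard, so 'getD … ""' is exact there
def pvAStep (d : PySem.Dict String (List String)) (frag : List (String × String)) :
    PySem.Dict String (List String) :=
  let fd := PySem.Dict.mk frag
  let path := fd.getD "path" ""
  let d1 := if d.contains path then d else d.insert path []
  if fd.contains "content" then d1.modify path [] (· ++ [fd.getD "content" ""]) else d1

def extract_content_by_file_py (context : List (String × List (List (String × String)))) : List (String × String) :=
  let fragments := (PySem.Dict.mk context).getD "fragments" []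
  let by_file := fragments.foldl pvAStep PySem.Dict.empty
  by_file.items.map (fun pv => (pv.1, PySem.Str.join "\n" pv.2))

-- ===== PORT B =====
-- f.get("path", "")
def pvFKey (f : List (String × String)) : String := (PySem.Dict.mk f).getD "path" ""

def extract_content_by_file_py_alt (context : List (String × List (List (String × String)))) : List (String × String) :=
  let frags := (PySem.Dict.mk context).getD "fragments" []
  let paths := PySem.List.dedup (frags.map pvFKey)
  paths.map (fun p => (p, PySem.Str.join "\n"
    ((frags.filter (fun f => (pvFKey f == p) && (PySem.Dict.mk f).contains "content")).map
      (fun f => (PySem.Dict.mk f).getD "content" ""))))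

-- ===== PRECONDITION & SPEC =====
def Spec_extract_content_by_file_py (context : List (String × List (List (String × String)))) (out : List (String × String)) : Prop := out = extract_content_by_file_py_alt context
instance (context : List (String × List (List (String × String)))) (out : List (String × String)) : Decidable (Spec_extract_content_by_file_py context out) := by unfold Spec_extract_content_by_file_py; infer_instance

-- ===== CLAIM (what is proved, stated in full; the proofs are below) =====
def Claim_equal_extract_content_by_file_py : Prop := ∀ (context : List (String × List (List (String × String)))), Dom_extract_content_by_file_py context → Spec_extract_content_by_file_py context (extract_content_by_file_py context)

-- ===== LEMMAS AND PROOFS =====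

-- the (0- or 1-element) list of contents a fragment contributes
def pvCS (f : List (String × String)) : List String :=
  if (PySem.Dict.mk f).contains "content" then [(PySem.Dict.mk f).getD "content" ""] else []

-- A's loop body as a single 'modify'
def pvStepM (d : PySem.Dict String (List String)) (f : List (String × String)) :
    PySem.Dict String (List String) :=
  d.modify (pvFKey f) [] (· ++ pvCS f)

lemma pvInsert_getD_self (d : PySem.Dict String (List String)) (k : String)
    (h : d.contains k = true) (hnd : d.keys.Nodup) (v : List String) :
    d.insert k (d.getD k v) = d := by
  apply PySem.Dict.ext
  rw [PySem.Dict.items_insert_of_contains (h := h)]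
  conv_rhs => rw [← List.map_id d.items]
  apply List.map_congr_left
  intro p hp
  by_cases hk : p.1 = k
  · have hm : (p.1, p.2) ∈ d.items := by simpa using hp
    have h2 : d.getD k v = p.2 := by rw [← hk]; exact PySem.Dict.getD_of_mem_items d hm hnd v
    have h3 : (k, p.2) = p := by rw [← hk]
    simp [hk, h2, h3]
  · simp [hk]

lemma pvStepA_eq (d : PySem.Dict String (List String)) (f : List (String × String))
    (h : d.keys.Nodup) : pvAStep d f = pvStepM d f := by
  unfold pvAStep pvStepM pvFKey pvCS
  simp only [PySem.Dict.modify]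
  by_cases hc : (PySem.Dict.mk f).contains "content" = true
  · by_cases hp : d.contains ((PySem.Dict.mk f).getD "path" "") = true
    · simp only [hc, hp, if_true]
    · simp only [hc, hp, Bool.false_eq_true, ite_false, ite_true,
        PySem.Dict.getD_insert_self, PySem.Dict.insert_insert_self,
        PySem.Dict.getD_of_not_contains (h := by simpa using hp)]
  · by_cases hp : d.contains ((PySem.Dict.mk f).getD "path" "") = true
    · simp only [hc, hp, Bool.false_eq_true, ite_false, ite_true, List.append_nil]
      exact (pvInsert_getD_self d _ hp h _).symm
    · simp only [hc, hp, Bool.false_eq_true, ite_false, List.append_nil,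
        PySem.Dict.getD_of_not_contains (h := by simpa using hp)]

lemma pvStepM_nodup (d : PySem.Dict String (List String)) (f : List (String × String))
    (h : d.keys.Nodup) : (pvStepM d f).keys.Nodup := by
  unfold pvStepM
  simp only [PySem.Dict.modify]
  by_cases hc : d.contains (pvFKey f) = true
  · rw [PySem.Dict.keys_insert_of_contains (h := hc)]; exact h
  · rw [PySem.Dict.keys_insert_of_not_contains (h := by simpa using hc)]
    simp only [List.nodup_append, List.nodup_cons]
    refine ⟨h, by simp, fun a ha b hb hab => ?_⟩
    simp only [List.mem_singleton] at hb
    exact hc ((PySem.Dict.contains_iff_mem_keys _ _).2 (by rw [hab, hb] at ha; exact ha))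

lemma pvFold_eq (fr : List (List (String × String))) (d : PySem.Dict String (List String))
    (h : d.keys.Nodup) : fr.foldl pvAStep d = fr.foldl pvStepM d := by
  induction fr generalizing d with
  | nil => rfl
  | cons f fr ih =>
    simp only [List.foldl_cons, pvStepA_eq d f h]
    exact ih _ (pvStepM_nodup d f h)

lemma pvGetD_fold (fr : List (List (String × String))) (d : PySem.Dict String (List String))
    (c : String) : (fr.foldl pvStepM d).getD c [] =
      d.getD c [] ++ (fr.filter (fun f => pvFKey f == c)).flatMap pvCS := by
  induction fr generalizing d with
  | nil => simp
  | cons f fr ih =>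
    simp only [List.foldl_cons, ih]
    by_cases hk : pvFKey f = c
    · simp [pvStepM, hk, List.append_assoc]
    · have hk' : c ≠ pvFKey f := fun hh => hk hh.symm
      simp [pvStepM, PySem.Dict.getD_modify, hk, hk']

lemma pvFlatMap_eq (fr : List (List (String × String))) (c : String) :
    (fr.filter (fun f => pvFKey f == c)).flatMap pvCS =
      (fr.filter (fun f => (pvFKey f == c) && (PySem.Dict.mk f).contains "content")).map
        (fun f => (PySem.Dict.mk f).getD "content" "") := by
  induction fr with
  | nil => rfl
  | cons f fr ih =>
    by_cases hk : (pvFKey f == c) = true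
    · by_cases hc : (PySem.Dict.mk f).contains "content" = true
      · simp only [List.filter_cons, hk, Bool.and_self, if_true, List.flatMap_cons,
          List.map_cons, ih, pvCS, hc]
        rfl
      · simp only [List.filter_cons, hk, hc, Bool.and_false, if_true,
          Bool.false_eq_true, ite_false, List.flatMap_cons, ih, pvCS]
        simp
    · simp only [List.filter_cons, hk, Bool.false_eq_true, ite_false, Bool.false_and]
      simpa using ih

lemma pvKeys_fold (fr : List (List (String × String))) (d : PySem.Dict String (List String)) :
    (fr.foldl pvStepM d).keys = PySem.Set.update d.keys (fr.map pvFKey) :=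
  PySem.Dict.keys_foldl_modify_key fr pvFKey [] (fun _ f => (· ++ pvCS f)) d

lemma pvNodup_fold (fr : List (List (String × String))) (d : PySem.Dict String (List String))
    (h : d.keys.Nodup) : (fr.foldl pvStepM d).keys.Nodup :=
  PySem.Dict.nodup_keys_foldl_modify_key fr pvFKey [] (fun _ f => (· ++ pvCS f)) d h

-- ===== VERDICT (by name: the statement is the Claim_ definition above) =====
theorem extract_content_by_file_py_spec : Claim_equal_extract_content_by_file_py := by
  intro context _
  unfold Spec_extract_content_by_file_py extract_content_by_file_py extract_content_by_file_py_alt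
  simp only
  rw [pvFold_eq _ _ (by simp)]
  rw [PySem.Dict.items_eq_map_keys _ (pvNodup_fold _ _ (by simp)) ([] : List String)]
  rw [pvKeys_fold]
  have hkeys : PySem.Set.update (PySem.Dict.empty : PySem.Dict String (List String)).keys
      (((PySem.Dict.mk context).getD "fragments" []).map pvFKey) =
      PySem.List.dedup (((PySem.Dict.mk context).getD "fragments" []).map pvFKey) := by
    rw [PySem.List.dedup_eq_ofList, PySem.Set.ofList_eq_foldl]; rfl
  rw [hkeys, List.map_map]
  apply List.map_congr_left
  intro p _
  simp only [Function.comp]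
  rw [pvGetD_fold, pvFlatMap_eq]
  simp
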